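-- pv_equiv track=rewrite | github.com/dnyansagar/gene_regulatory_network | processing/memeParser.py | sp_case1
-- ===== SOURCE A (Python) =====
-- def sp_case1(family_dict, list_of_list): # Approach 2 Specific
-- 	''' This is the special case where we want to check
-- 	if the sox and T-box motifs have overlapping ranges'''
-- 	mot_names = list_of_list[0]
-- 	mot_dists = list_of_list[2]
-- 	t1dist = "NA"; t2dist = "NA"; sox_dist = "NA"
-- 	tonly = "NA"; sox_only = "NA"
-- 	names = [[name for name, seq in family_dict.items() if i in seq] for i in mot_names]
-- 	for ix, i in enumerate(names):
-- 		if i !=[]: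
-- 			if (i[0] =="tbox1" or i[0] =="tbox2" or i[0] =="hmg"):
-- 				if i[0] == "tbox2" : t2dist = mot_dists[ix]
-- 				elif i[0] == "tbox1": t1dist = mot_dists[ix]
-- 				elif (i[0] =="hmg"): sox_dist = mot_dists[ix]
-- 	if t1dist =="NA" and t2dist == "NA" and sox_dist !="NA":
-- 		sox_only = sox_dist
-- 	elif sox_dist  == "NA" and (t1dist !="NA" or t2dist != "NA"):
-- 		tonly = t2dist if t2dist != "NA" else t1dist
-- 	return (t1dist, t2dist, sox_dist, tonly, sox_only)
-- ===== SOURCE B (Python) =====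
-- def sp_case1(family_dict, list_of_list):
--     '''Special case: check whether the sox and T-box motifs have overlapping
--     ranges.  B: build an inverted index motif -> first family by overwriting
--     assignments over the families in reverse order, then run three independent
--     backward early-return searches (one per target family) for the last
--     matching motif, instead of A's per-motif family scan + forward state
--     machine.'''
--     mot_names = list_of_list[0]
--     mot_dists = list_of_list[2]
--     idx = {}
--     for name, seq in reversed(list(family_dict.items())):
--         for m in seq:
--             idx[m] = name
--     rev = list(enumerate(mot_names))[::-1]
--
--     def pick(fam):
--         for ix, m in rev:
--             if idx.get(m) == fam:
--                 return mot_dists[ix]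
--         return "NA"
--
--     t1dist = pick("tbox1")
--     t2dist = pick("tbox2")
--     sox_dist = pick("hmg")
--     tonly = (t2dist if t2dist != "NA" else t1dist) if sox_dist == "NA" else "NA"
--     sox_only = sox_dist if t1dist == "NA" and t2dist == "NA" else "NA"
--     return (t1dist, t2dist, sox_dist, tonly, sox_only)
-- ===== Notes on version B (the rewrite author's own statement) =====
-- stated objective: faster
-- what changed: A rescans every family's motif list for each motif name and then threads a 3-slot state machine forward; B builds an inverted index motif->first family in one reversed-overwrite pass and answers each of the three target families by an independent backward early-return search for the last matching motif.
import Mathlib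
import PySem

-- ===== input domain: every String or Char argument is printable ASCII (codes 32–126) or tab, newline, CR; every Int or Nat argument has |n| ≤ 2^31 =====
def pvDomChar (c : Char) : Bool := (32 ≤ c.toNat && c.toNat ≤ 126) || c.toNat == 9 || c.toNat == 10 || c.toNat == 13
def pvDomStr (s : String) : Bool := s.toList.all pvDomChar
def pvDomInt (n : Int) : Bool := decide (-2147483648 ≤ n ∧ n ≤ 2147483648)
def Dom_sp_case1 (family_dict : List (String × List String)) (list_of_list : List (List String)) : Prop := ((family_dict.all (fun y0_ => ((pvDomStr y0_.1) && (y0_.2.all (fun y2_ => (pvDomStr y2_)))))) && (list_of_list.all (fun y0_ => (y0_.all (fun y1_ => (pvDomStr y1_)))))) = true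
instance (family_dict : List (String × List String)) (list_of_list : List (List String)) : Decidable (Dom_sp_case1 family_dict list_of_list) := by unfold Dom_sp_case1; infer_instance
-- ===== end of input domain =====

-- B replaces A's per-motif family scan and forward 3-slot state machine by an inverted
-- index (reversed-overwrite pass) and three independent backward searches (faster in a timing run).

-- ===== PORT A =====
def sp_case1 (family_dict : List (String × List String)) (list_of_list : List (List String)) : String × String × String × String × String :=
  let mot_names := PySem.List.pyGetD list_of_list 0 []
  let mot_dists := PySem.List.pyGetD list_of_list 2 []
  -- names = [[name for name, seq in family_dict.items() if i in seq] for i in mot_names]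
  let names := mot_names.map (fun i =>
    ((PySem.Dict.ofList family_dict).items.filter (fun p => p.2.contains i)).map (·.1))
  -- for ix, i in enumerate(names): …
  let st := (PySem.List.enumerate names).foldl (fun (s : String × String × String) q =>
      let i := q.2
      if i ≠ [] then
        if i.headD "" == "tbox1" || i.headD "" == "tbox2" || i.headD "" == "hmg" then
          if i.headD "" == "tbox2" then (s.1, PySem.List.pyGetD mot_dists q.1 "NA", s.2.2)
          else if i.headD "" == "tbox1" then (PySem.List.pyGetD mot_dists q.1 "NA", s.2.1, s.2.2)
          else if i.headD "" == "hmg" then (s.1, s.2.1, PySem.List.pyGetD mot_dists q.1 "NA")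
          else s
        else s
      else s) ("NA", "NA", "NA")
  let t1dist := st.1
  let t2dist := st.2.1
  let sox_dist := st.2.2
  let sox_only := if t1dist == "NA" && t2dist == "NA" && sox_dist != "NA" then sox_dist else "NA"
  let tonly := if sox_dist == "NA" && (t1dist != "NA" || t2dist != "NA") then
      (if t2dist != "NA" then t2dist else t1dist) else "NA"
  (t1dist, t2dist, sox_dist, tonly, sox_only)

-- ===== PORT B =====
-- def pick(fam): for ix, m in rev: if idx.get(m) == fam: return mot_dists[ix]; return "NA"
def sp1AltPick (idx : PySem.Dict String String) (mot_dists : List String)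
    (rev : List (Int × String)) (fam : String) : String :=
  match rev.find? (fun q => idx.get? q.2 == some fam) with
  | some q => PySem.List.pyGetD mot_dists q.1 "NA"
  | none => "NA"

def sp_case1_alt (family_dict : List (String × List String)) (list_of_list : List (List String)) : String × String × String × String × String :=
  let mot_names := PySem.List.pyGetD list_of_list 0 []
  let mot_dists := PySem.List.pyGetD list_of_list 2 []
  -- idx = {}; for name, seq in reversed(list(family_dict.items())): for m in seq: idx[m] = name
  let idx := ((PySem.Dict.ofList family_dict).items.reverse).foldl
      (fun d p => p.2.foldl (fun d m => d.insert m p.1) d)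
      (PySem.Dict.empty : PySem.Dict String String)
  -- rev = list(enumerate(mot_names))[::-1]
  let rev := (PySem.List.enumerate mot_names).reverse
  let t1dist := sp1AltPick idx mot_dists rev "tbox1"
  let t2dist := sp1AltPick idx mot_dists rev "tbox2"
  let sox_dist := sp1AltPick idx mot_dists rev "hmg"
  let tonly := if sox_dist == "NA" then (if t2dist != "NA" then t2dist else t1dist) else "NA"
  let sox_only := if t1dist == "NA" && t2dist == "NA" then sox_dist else "NA"
  (t1dist, t2dist, sox_dist, tonly, sox_only)

-- ===== PRECONDITION & SPEC =====
-- Pre_ excludes exactly the inputs where the Python raises: fewer than three sublists in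
-- list_of_list (IndexError on list_of_list[2]), or a motif name whose first matching family is
-- tbox1/tbox2/hmg at a position ix with ix ≥ len(mot_dists) (IndexError on mot_dists[ix]).
def Pre_sp_case1 (family_dict : List (String × List String)) (list_of_list : List (List String)) : Prop :=
  3 ≤ list_of_list.length ∧
  ∀ q ∈ PySem.List.enumerate (PySem.List.pyGetD list_of_list 0 []),
    (((PySem.Dict.ofList family_dict).items.find? (fun p => p.2.contains q.2)).any
      (fun p => p.1 == "tbox1" || p.1 == "tbox2" || p.1 == "hmg")) = true →
    q.1 < (PySem.List.pyGetD list_of_list 2 []).length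
instance (family_dict : List (String × List String)) (list_of_list : List (List String)) : Decidable (Pre_sp_case1 family_dict list_of_list) := by unfold Pre_sp_case1; infer_instance

def pvWitness_sp_case1 : (List (String × List String)) × List (List String) :=
  ([("hmg", ["m1", "m2"]), ("tbox2", ["m3"])], [["m1", "m3"], [], ["5", "7"]])

def Spec_sp_case1 (family_dict : List (String × List String)) (list_of_list : List (List String)) (out : String × String × String × String × String) : Prop := out = sp_case1_alt family_dict list_of_list
instance (family_dict : List (String × List String)) (list_of_list : List (List String)) (out : String × String × String × String × String) : Decidable (Spec_sp_case1 family_dict list_of_list out) := by unfold Spec_sp_case1; infer_instance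

-- ===== CLAIM (what is proved, stated in full; the proofs are below) =====
def Claim_equal_sp_case1 : Prop := ∀ (family_dict : List (String × List String)) (list_of_list : List (List String)), Dom_sp_case1 family_dict list_of_list → Pre_sp_case1 family_dict list_of_list → Spec_sp_case1 family_dict list_of_list (sp_case1 family_dict list_of_list)

-- ===== LEMMAS AND PROOFS =====

lemma get?_insert_fold (seq : List String) (d : PySem.Dict String String) (name m : String) :
    (seq.foldl (fun d m' => d.insert m' name) d).get? m =
      if seq.contains m then some name else d.get? m := by
  induction seq generalizing d with
  | nil => simp
  | cons a seq ih =>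
    simp only [List.foldl_cons, ih]
    by_cases ham : a = m
    · subst ham; simp [PySem.Dict.get?_insert_self]
    · rw [PySem.Dict.get?_insert_of_ne _ _ (Ne.symm ham)]
      simp [Ne.symm ham]

-- the reversed-overwrite index answers exactly "first family containing m"
lemma get?_rev_index (items : List (String × List String)) (m : String) :
    ((items.reverse).foldl
        (fun d p => p.2.foldl (fun d m' => d.insert m' p.1) d)
        (PySem.Dict.empty : PySem.Dict String String)).get? m =
      (items.find? (fun p => p.2.contains m)).map (·.1) := by
  induction items with
  | nil => simp
  | cons p items ih =>
    rw [List.reverse_cons, List.foldl_append, List.foldl_cons, List.foldl_nil,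
      get?_insert_fold, ih, List.find?_cons]
    by_cases hpm : m ∈ p.2 <;> simp [hpm]

lemma head?_filter_map_fst (items : List (String × List String)) (pred : String × List String → Bool) :
    ((items.filter pred).map (·.1)).head? = (items.find? pred).map (·.1) := by
  induction items with
  | nil => simp
  | cons p items ih =>
    by_cases hp : pred p <;> simp [hp, ih]

lemma foldl_enumerate_map {α β σ : Type} (f : α → β) (g : σ → Int × β → σ) :
    ∀ (l : List α) (k : Int) (s0 : σ),
      (PySem.List.enumerate (l.map f) k).foldl g s0 =
        (PySem.List.enumerate l k).foldl (fun s q => g s (q.1, f q.2)) s0 := by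
  intro l
  induction l with
  | nil => simp [PySem.List.enumerate_nil]
  | cons a l ih => intro k s0; simp [PySem.List.enumerate_cons, ih]

-- the backward early-return search, with an arbitrary default for the induction
def pickG (g : String → Option String) (v : Int → String) (l : List (Int × String))
    (fam dflt : String) : String :=
  match l.reverse.find? (fun q => g q.2 == some fam) with
  | some q => v q.1
  | none => dflt

lemma pickG_cons (g : String → Option String) (v : Int → String) (q : Int × String)
    (l : List (Int × String)) (fam dflt : String) :
    pickG g v (q :: l) fam dflt =
      pickG g v l fam (if g q.2 == some fam then v q.1 else dflt) := by
  simp only [pickG, List.reverse_cons, List.find?_append]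
  cases hf : l.reverse.find? (fun q => g q.2 == some fam) with
  | some r => simp
  | none =>
    by_cases hg : g q.2 == some fam <;> simp [List.find?, hg]

-- A's forward 3-slot state machine computes the three backward searches
lemma fold_eq_picks (g : String → Option String) (v : Int → String) :
    ∀ (l : List (Int × String)) (s0 : String × String × String),
      l.foldl (fun (s : String × String × String) q =>
        if g q.2 == some "tbox2" then (s.1, v q.1, s.2.2)
        else if g q.2 == some "tbox1" then (v q.1, s.2.1, s.2.2)
        else if g q.2 == some "hmg" then (s.1, s.2.1, v q.1)
        else s) s0
      = (pickG g v l "tbox1" s0.1, pickG g v l "tbox2" s0.2.1, pickG g v l "hmg" s0.2.2) := by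
  intro l
  induction l with
  | nil => intro s0; simp [pickG]
  | cons q l ih =>
    intro s0
    simp only [List.foldl_cons, ih, pickG_cons]
    congr 1
    · split_ifs with h1 h2 h3 <;> simp_all
    congr 1
    · split_ifs with h1 h2 h3 <;> simp_all
    · split_ifs with h1 h2 h3 <;> simp_all

-- A's per-motif step equals the canonical step driven by g = first matching family
lemma stepA_eq (fd : List (String × List String)) (mot_dists : List String)
    (s : String × String × String) (q : Int × String) :
    (let i := ((PySem.Dict.ofList fd).items.filter (fun p => p.2.contains q.2)).map (·.1)
      if i ≠ [] then
        if i.headD "" == "tbox1" || i.headD "" == "tbox2" || i.headD "" == "hmg" then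
          if i.headD "" == "tbox2" then (s.1, PySem.List.pyGetD mot_dists q.1 "NA", s.2.2)
          else if i.headD "" == "tbox1" then (PySem.List.pyGetD mot_dists q.1 "NA", s.2.1, s.2.2)
          else if i.headD "" == "hmg" then (s.1, s.2.1, PySem.List.pyGetD mot_dists q.1 "NA")
          else s
        else s
      else s)
    = (let g := ((PySem.Dict.ofList fd).items.find? (fun p => p.2.contains q.2)).map (·.1)
        if g == some "tbox2" then (s.1, PySem.List.pyGetD mot_dists q.1 "NA", s.2.2)
        else if g == some "tbox1" then (PySem.List.pyGetD mot_dists q.1 "NA", s.2.1, s.2.2)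
        else if g == some "hmg" then (s.1, s.2.1, PySem.List.pyGetD mot_dists q.1 "NA")
        else s) := by
  simp only [← head?_filter_map_fst]
  cases hL : ((PySem.Dict.ofList fd).items.filter (fun p => p.2.contains q.2)).map (·.1) with
  | nil => simp
  | cons h t =>
    simp only [List.head?_cons, List.headD_cons, ne_eq, reduceCtorEq, not_false_eq_true, if_true]
    by_cases h2 : h = "tbox2"
    · simp [h2]
    · by_cases h1 : h = "tbox1"
      · simp [h1]
      · by_cases hh : h = "hmg"
        · simp [hh]
        · simp [h1, h2, hh]

-- the two tail computations assemble the same 5-tuple from the three slot values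
lemma assemble (t1 t2 sox : String) :
    (t1, t2, sox,
      (if sox == "NA" && (t1 != "NA" || t2 != "NA") then
        (if t2 != "NA" then t2 else t1) else "NA"),
      (if t1 == "NA" && t2 == "NA" && sox != "NA" then sox else "NA"))
    = (t1, t2, sox,
        (if sox == "NA" then (if t2 != "NA" then t2 else t1) else "NA"),
        (if t1 == "NA" && t2 == "NA" then sox else "NA")) := by
  by_cases h1 : t1 = "NA" <;> by_cases h2 : t2 = "NA" <;> by_cases hs : sox = "NA" <;>
    simp_all

-- ===== VERDICT (by name: the statement is the Claim_ definition above) =====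
theorem sp_case1_spec : Claim_equal_sp_case1 := by
  intro fd lol _ _
  show sp_case1 fd lol = sp_case1_alt fd lol
  have hg : ∀ (m : String),
      (((PySem.Dict.ofList fd).items.reverse).foldl
          (fun d p => p.2.foldl (fun d m' => d.insert m' p.1) d)
          (PySem.Dict.empty : PySem.Dict String String)).get? m =
        ((PySem.Dict.ofList fd).items.find? (fun p => p.2.contains m)).map (·.1) :=
    fun m => get?_rev_index _ m
  have hpred : ∀ (fam : String),
      (fun (q : Int × String) =>
          (((PySem.Dict.ofList fd).items.reverse).foldl
              (fun d p => p.2.foldl (fun d m' => d.insert m' p.1) d)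
              (PySem.Dict.empty : PySem.Dict String String)).get? q.2 == some fam)
        = (fun q => (((PySem.Dict.ofList fd).items.find? (fun p => p.2.contains q.2)).map (·.1)) == some fam) :=
    fun fam => funext fun q => by rw [hg]
  simp only [sp_case1, sp_case1_alt, sp1AltPick, hpred]
  rw [foldl_enumerate_map]
  have hstep : (fun (s : String × String × String) (q : Int × String) =>
      (fun (s : String × String × String) (q : Int × List String) =>
        if q.2 ≠ [] then
          if q.2.headD "" == "tbox1" || q.2.headD "" == "tbox2" || q.2.headD "" == "hmg" then
            if q.2.headD "" == "tbox2" then (s.1, PySem.List.pyGetD (PySem.List.pyGetD lol 2 []) q.1 "NA", s.2.2)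
            else if q.2.headD "" == "tbox1" then (PySem.List.pyGetD (PySem.List.pyGetD lol 2 []) q.1 "NA", s.2.1, s.2.2)
            else if q.2.headD "" == "hmg" then (s.1, s.2.1, PySem.List.pyGetD (PySem.List.pyGetD lol 2 []) q.1 "NA")
            else s
          else s
        else s) s (q.1, ((PySem.Dict.ofList fd).items.filter (fun p => p.2.contains q.2)).map (·.1)))
      = (fun (s : String × String × String) (q : Int × String) =>
          if (((PySem.Dict.ofList fd).items.find? (fun p => p.2.contains q.2)).map (·.1)) == some "tbox2" then (s.1, PySem.List.pyGetD (PySem.List.pyGetD lol 2 []) q.1 "NA", s.2.2)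
          else if (((PySem.Dict.ofList fd).items.find? (fun p => p.2.contains q.2)).map (·.1)) == some "tbox1" then (PySem.List.pyGetD (PySem.List.pyGetD lol 2 []) q.1 "NA", s.2.1, s.2.2)
          else if (((PySem.Dict.ofList fd).items.find? (fun p => p.2.contains q.2)).map (·.1)) == some "hmg" then (s.1, s.2.1, PySem.List.pyGetD (PySem.List.pyGetD lol 2 []) q.1 "NA")
          else s) :=
    funext fun s => funext fun q => stepA_eq fd (PySem.List.pyGetD lol 2 []) s q
  rw [hstep,
    fold_eq_picks (fun m => (((PySem.Dict.ofList fd).items.find? (fun p => p.2.contains m)).map (·.1)))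
      (fun i => PySem.List.pyGetD (PySem.List.pyGetD lol 2 []) i "NA")]
  simp only [pickG]
  exact assemble _ _ _
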